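-- pv_equiv track=rewrite | github.com/stratis-storage/stratis-cli | tests/whitebox/unittest/test_introspect_validation.py | is_valid_dbus_signature
-- ===== SOURCE A (Python) =====
-- def is_valid_dbus_signature(sig: str) -> bool:
--     """
--     Very lightweight validator for DBus type signatures.
--     It checks that the signature contains only valid type characters and that compound types
--     have balanced parentheses and valid struct/dict/array ordering.
--
--     Reference (simplified):
--       - Basic types: ybnqiuxtdsogvh (plus 'a' for array, 'v' variant)
--       - Struct: ( ... )
--       - Dict entry: a{key value} where key is a basic type except 'v' and 'a', value is any valid type
--       - Object path: 'o', Signature: 'g'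
--     """
--     allowed_basic = set("ybnqiuxtdsogvh")
--     i = 0
--     n = len(sig)
--
--     def parse_type(idx: int) -> int:
--         if idx >= n:
--             return -1
--         ch = sig[idx]
--         if ch in allowed_basic:
--             return idx + 1
--         if ch == 'a':  # array
--             # array of any complete type or dict entry
--             nxt = idx + 1
--             if nxt < n and sig[nxt] == '{':
--                 # dict entry: a{kv}
--                 # parse key
--                 nxt += 1
--                 if nxt >= n:
--                     return -1
--                 # key must be basic type except 'v' and arrays/containers
--                 if sig[nxt] in allowed_basic - set('v'):
--                     nxt += 1
--                 else:
--                     return -1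
--                 # parse value type
--                 nxt2 = parse_type(nxt)
--                 if nxt2 == -1:
--                     return -1
--                 if nxt2 >= n or sig[nxt2] != '}':
--                     return -1
--                 return nxt2 + 1
--             else:
--                 # array of a regular type
--                 nxt2 = parse_type(nxt)
--                 return -1 if nxt2 == -1 else nxt2
--         if ch == '(':
--             # struct: parse consecutive types until ')'
--             nxt = idx + 1
--             while nxt < n and sig[nxt] != ')':
--                 nxt2 = parse_type(nxt)
--                 if nxt2 == -1:
--                     return -1
--                 nxt = nxt2
--             if nxt >= n or sig[nxt] != ')':
--                 return -1
--             return nxt + 1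
--         # everything else invalid
--         return -1
--
--     while i < n:
--         j = parse_type(i)
--         if j == -1:
--             return False
--         i = j
--     return True
-- ===== SOURCE B (Python) =====
-- def is_valid_dbus_signature(sig: str) -> bool:
--     basic = "ybnqiuxtdsogvh"
--     # single forward scan with an explicit stack of context frames:
--     # 's' = inside struct body, 'k' = dict entry expecting key,
--     # 'v' = dict entry expecting value, 'e' = dict entry expecting '}'
--     stack = []
--     arr = 0  # pending consecutive 'a' array markers
--     for c in sig:
--         if stack and stack[-1] == 'k':
--             if c in basic and c != 'v':
--                 stack[-1] = 'v'
--             else: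
--                 return False
--         elif stack and stack[-1] == 'e':
--             if c != '}':
--                 return False
--             stack.pop()
--             arr = 0
--             if stack and stack[-1] == 'v':
--                 stack[-1] = 'e'
--         elif c in basic:
--             arr = 0
--             if stack and stack[-1] == 'v':
--                 stack[-1] = 'e'
--         elif c == 'a':
--             arr += 1
--         elif c == '{':
--             if arr == 0:
--                 return False
--             arr = 0
--             stack.append('k')
--         elif c == '(':
--             arr = 0
--             stack.append('s')
--         elif c == ')':
--             if arr != 0 or not stack or stack[-1] != 's':
--                 return False
--             stack.pop()
--             if stack and stack[-1] == 'v':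
--                 stack[-1] = 'e'
--         else:
--             return False
--     return not stack and arr == 0
-- ===== Notes on version B (the rewrite author's own statement) =====
-- stated objective: alternative
-- what changed: Replaced the recursive-descent parser (nested recursion with index returns and a -1 sentinel) by a single left-to-right scan driven by an explicit stack of context frames plus a pending-array counter.
import Mathlib
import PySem

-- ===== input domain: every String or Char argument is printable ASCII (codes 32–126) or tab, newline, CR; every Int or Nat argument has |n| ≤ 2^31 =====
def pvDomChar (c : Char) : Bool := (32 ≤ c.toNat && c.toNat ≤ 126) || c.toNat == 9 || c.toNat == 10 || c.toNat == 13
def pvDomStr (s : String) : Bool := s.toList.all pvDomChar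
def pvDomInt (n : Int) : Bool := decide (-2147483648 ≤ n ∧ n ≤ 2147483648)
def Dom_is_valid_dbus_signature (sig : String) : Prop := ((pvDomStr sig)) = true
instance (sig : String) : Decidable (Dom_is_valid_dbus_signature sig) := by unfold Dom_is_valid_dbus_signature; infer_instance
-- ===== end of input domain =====

-- B replaces A's recursive-descent parser by a single forward scan driven by an explicit stack of
-- context frames plus a pending-array counter (same return value; an alternative decomposition).

-- ===== PORT A =====
-- A's recursive `parse_type`, transliterated over suffix lists (index i ↦ the suffix sig[i:], the
-- -1 failure sentinel ↦ none); the returned suffix carries its length bound so that A's inner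
-- struct-body while loop (the second mutual function) and the outer while loop terminate.
def allowedBasicA : List Char := "ybnqiuxtdsogvh".toList

mutual
def parseTypeA : (l : List Char) → Option {r : List Char // r.length < l.length}
  | [] => none
  | ch :: rest =>
    if ch ∈ allowedBasicA then some ⟨rest, by simp⟩
    else if ch = 'a' then
      match rest with
      | [] => none   -- parse_type(idx+1) with idx+1 ≥ n: returns -1
      | x :: rest2 =>
        if x = '{' then
          -- dict entry a{kv}
          match rest2 with
          | [] => none
          | k :: rest3 =>
            if k ∈ allowedBasicA ∧ k ≠ 'v' then
              match parseTypeA rest3 with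
              | none => none
              | some ⟨r, h⟩ =>
                match r with
                | [] => none
                | y :: r2 => if y = '}' then some ⟨r2, by simp at h ⊢; omega⟩ else none
            else none
        else
          match parseTypeA (x :: rest2) with
          | none => none
          | some ⟨r, h⟩ => some ⟨r, by simp at h ⊢; omega⟩
    else if ch = '(' then
      match structBodyA rest with
      | none => none
      | some ⟨r, h⟩ =>
        match r with
        | [] => none
        | y :: r2 => if y = ')' then some ⟨r2, by simp at h ⊢; omega⟩ else none
    else none
  termination_by l => (l.length, 0)
  decreasing_by all_goals (simp_wf; (try simp only [List.length_cons] at *); first | omega | (apply Prod.Lex.left; omega) | (apply Prod.Lex.right; omega))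

def structBodyA : (l : List Char) → Option {r : List Char // r.length ≤ l.length}
  | [] => some ⟨[], by simp⟩
  | c :: rest =>
    if c = ')' then some ⟨c :: rest, by simp⟩
    else
      match parseTypeA (c :: rest) with
      | none => none
      | some ⟨r, h⟩ =>
        match structBodyA r with
        | none => none
        | some ⟨r2, h2⟩ => some ⟨r2, by simp at h ⊢; omega⟩
  termination_by l => (l.length, 1)
  decreasing_by all_goals (simp_wf; (try simp only [List.length_cons] at *); first | omega | (apply Prod.Lex.left; omega) | (apply Prod.Lex.right; omega))
end

def loopTypesA : List Char → Bool
  | [] => true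
  | c :: rest =>
    match parseTypeA (c :: rest) with
    | none => false
    | some ⟨r, _h⟩ => loopTypesA r
  termination_by l => l.length
  decreasing_by simp_wf; (try simp only [List.length_cons] at *); omega


def is_valid_dbus_signature (sig : String) : Bool := loopTypesA sig.toList

-- ===== PORT B =====

inductive BFrame : Type
  | strct | key | val | clos
deriving DecidableEq, Repr

def basicB : List Char := "ybnqiuxtdsogvh".toList

def closeSlotB : List BFrame → List BFrame
  | .val :: tl => .clos :: tl
  | st => st

def scanB : List Char → List BFrame → Nat → Bool
  | [], stack, arr => stack.isEmpty && arr == 0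
  | c :: rest, stack, arr =>
    match stack with
    | .key :: tl =>
      if c ∈ basicB ∧ c ≠ 'v' then scanB rest (.val :: tl) arr else false
    | .clos :: tl =>
      if c = '}' then scanB rest (closeSlotB tl) 0 else false
    | stack =>
      if c ∈ basicB then scanB rest (closeSlotB stack) 0
      else if c = 'a' then scanB rest stack (arr + 1)
      else if c = '{' then
        (if arr == 0 then false else scanB rest (.key :: stack) 0)
      else if c = '(' then scanB rest (.strct :: stack) 0
      else if c = ')' then
        (if arr == 0 then
          match stack with
          | .strct :: tl => scanB rest (closeSlotB tl) 0
          | _ => false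
        else false)
      else false

def is_valid_dbus_signature_alt (sig : String) : Bool := scanB sig.toList [] 0

-- ===== PRECONDITION & SPEC =====
def Spec_is_valid_dbus_signature (sig : String) (out : Bool) : Prop := out = is_valid_dbus_signature_alt sig
instance (sig : String) (out : Bool) : Decidable (Spec_is_valid_dbus_signature sig out) := by unfold Spec_is_valid_dbus_signature; infer_instance

-- ===== CLAIM (what is proved, stated in full; the proofs are below) =====
def Claim_equal_is_valid_dbus_signature : Prop := ∀ (sig : String), Dom_is_valid_dbus_signature sig → Spec_is_valid_dbus_signature sig (is_valid_dbus_signature sig)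

-- ===== LEMMAS AND PROOFS =====
-- Option-valued views of A's parser, an A-side denotation `denT` for every machine stack, and a
-- simulation proof `scanB_denT`: the machine state (stack, arr, l) computes what A's parser,
-- resumed in context `stack` on input 'a'^arr ++ l, returns.
def parseA? (l : List Char) : Option (List Char) := (parseTypeA l).map Subtype.val
def structA? (l : List Char) : Option (List Char) := (structBodyA l).map Subtype.val

def matchClose (close : Char) (r : List Char) : Option (List Char) :=
  match r with
  | [] => none
  | y :: r2 => if y = close then some r2 else none

def dictStep (rest : List Char) : Option (List Char) :=
  match rest with
  | [] => none
  | k :: r3 =>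
    if k ∈ allowedBasicA ∧ k ≠ 'v' then
      (match parseA? r3 with
       | none => none
       | some r => matchClose '}' r)
    else none

theorem parseAq_basic0 (c : Char) (rest : List Char) (hc : c ∈ allowedBasicA) :
    parseA? (c :: rest) = some rest := by
  rw [parseA?, parseTypeA.eq_def]; simp [hc]

theorem parseAq_other0 (c : Char) (rest : List Char)
    (hc : c ∉ allowedBasicA) (ha : c ≠ 'a') (hp : c ≠ '(') :
    parseA? (c :: rest) = none := by
  rw [parseA?, parseTypeA.eq_def]; simp [hc, ha, hp]

theorem parseAq_a_nil : parseA? ['a'] = none := by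
  rw [parseA?, parseTypeA.eq_def]
  simp [show ('a':Char) ∉ allowedBasicA from by decide]

theorem parseAq_a_cons (x : Char) (xs : List Char) (hx : x ≠ '{') :
    parseA? ('a' :: x :: xs) = parseA? (x :: xs) := by
  conv_lhs => rw [parseA?, parseTypeA.eq_def]
  simp only [if_neg (by decide : ¬ (('a':Char) ∈ allowedBasicA)), if_neg hx]
  cases hp : parseTypeA (x :: xs) with
  | none => simp [parseA?, hp]
  | some v => obtain ⟨r, h⟩ := v; simp [parseA?, hp]

theorem parseAq_brace1 (rest : List Char) :
    parseA? ('a' :: '{' :: rest) = dictStep rest := by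
  conv_lhs => rw [parseA?, parseTypeA.eq_def]
  simp only [if_neg (by decide : ¬ (('a':Char) ∈ allowedBasicA))]
  cases rest with
  | nil => simp [dictStep]
  | cons k r3 =>
    rw [dictStep]
    by_cases hk : k ∈ allowedBasicA ∧ k ≠ 'v'
    · simp only [if_pos hk]
      cases hp : parseTypeA r3 with
      | none => simp [parseA?, hp]
      | some v =>
        obtain ⟨r, h⟩ := v
        cases r with
        | nil => simp [parseA?, hp, matchClose]
        | cons y r2 =>
          by_cases hy : y = '}'
          · subst hy; simp [parseA?, hp, matchClose]
          · simp [parseA?, hp, matchClose, hy]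
    · simp [if_neg hk]

theorem parseAq_paren0 (rest : List Char) :
    parseA? ('(' :: rest) =
      (match structA? rest with
       | none => none
       | some r => matchClose ')' r) := by
  conv_lhs => rw [parseA?, parseTypeA.eq_def]
  simp only [if_neg (by decide : ¬ (('(':Char) ∈ allowedBasicA)),
             if_neg (by decide : ¬ (('(':Char) = 'a'))]
  cases hs : structBodyA rest with
  | none => simp [structA?, hs]
  | some v =>
    obtain ⟨r, h⟩ := v
    cases r with
    | nil => simp [structA?, hs, matchClose]
    | cons y r2 =>
      by_cases hy : y = ')'
      · subst hy; simp [structA?, hs, matchClose]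
      · simp [structA?, hs, matchClose, hy]

theorem structAq_nil : structA? [] = some [] := by simp [structA?, structBodyA]

theorem structAq_rparen (rest : List Char) : structA? (')' :: rest) = some (')' :: rest) := by
  simp [structA?, structBodyA]

theorem structAq_cons (c : Char) (rest : List Char) (hc : c ≠ ')') :
    structA? (c :: rest) =
      (match parseA? (c :: rest) with
       | none => none
       | some r => structA? r) := by
  rw [structA?, structBodyA]
  simp only [if_neg hc]
  cases hp : parseTypeA (c :: rest) with
  | none => simp [parseA?, hp]
  | some v =>
    obtain ⟨r, h⟩ := v
    simp only [parseA?, hp, Option.map_some]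
    cases hs : structBodyA r with
    | none => simp [structA?, hs]
    | some v2 => obtain ⟨r2, h2⟩ := v2; simp [structA?, hs]

theorem loopTypesA_cons (c : Char) (rest : List Char) :
    loopTypesA (c :: rest) =
      (match parseA? (c :: rest) with
       | none => false
       | some r => loopTypesA r) := by
  rw [loopTypesA]
  cases hp : parseTypeA (c :: rest) with
  | none => simp [parseA?, hp]
  | some v => obtain ⟨r, h⟩ := v; simp [parseA?, hp]

-- ===== replicate-prefix lemmas =====
theorem parseAq_a_chain (n : Nat) (x : Char) (xs : List Char) (hx : x ≠ '{') :
    parseA? (List.replicate n 'a' ++ x :: xs) = parseA? (x :: xs) := by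
  induction n with
  | zero => simp
  | succ m ih =>
    rw [List.replicate_succ, List.cons_append]
    cases m with
    | zero => simpa using parseAq_a_cons x xs hx
    | succ p =>
      rw [List.replicate_succ, List.cons_append]
      rw [parseAq_a_cons 'a' _ (by decide)]
      rw [← List.cons_append, ← List.replicate_succ]
      exact ih

theorem parseAq_rep_nil (arr : Nat) : parseA? (List.replicate arr 'a') = none := by
  cases arr with
  | zero => simp [parseA?, parseTypeA]
  | succ n =>
    have h : List.replicate (n+1) 'a' = List.replicate n 'a' ++ ['a'] := List.replicate_succ' ..
    rw [h, parseAq_a_chain n 'a' [] (by decide)]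
    exact parseAq_a_nil

theorem parseAq_rep_basic (arr : Nat) (c : Char) (rest : List Char) (hc : c ∈ allowedBasicA) :
    parseA? (List.replicate arr 'a' ++ c :: rest) = some rest := by
  have hx : c ≠ '{' := by rintro rfl; exact absurd hc (by decide)
  rw [parseAq_a_chain arr c rest hx]
  exact parseAq_basic0 c rest hc

theorem parseAq_rep_brace (arr : Nat) (rest : List Char) :
    parseA? (List.replicate (arr + 1) 'a' ++ '{' :: rest) = dictStep rest := by
  have h : List.replicate (arr+1) 'a' ++ '{' :: rest
      = List.replicate arr 'a' ++ 'a' :: '{' :: rest := by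
    rw [List.replicate_succ']; simp
  rw [h, parseAq_a_chain arr 'a' _ (by decide)]
  exact parseAq_brace1 rest

theorem parseAq_rep_paren (arr : Nat) (rest : List Char) :
    parseA? (List.replicate arr 'a' ++ '(' :: rest) =
      (match structA? rest with
       | none => none
       | some r => matchClose ')' r) := by
  rw [parseAq_a_chain arr '(' rest (by decide)]
  exact parseAq_paren0 rest

theorem parseAq_rep_other (arr : Nat) (c : Char) (rest : List Char)
    (hc : c ∉ allowedBasicA) (ha : c ≠ 'a') (hp : c ≠ '(') (hb : c ≠ '{') :
    parseA? (List.replicate arr 'a' ++ c :: rest) = none := by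
  rw [parseAq_a_chain arr c rest hb]
  exact parseAq_other0 c rest hc ha hp

theorem basicB_eq : basicB = allowedBasicA := rfl

def frameRank : BFrame → Nat
  | .key => 2
  | .val => 1
  | _ => 0

theorem closeSlotB_length (tl : List BFrame) : (closeSlotB tl).length = tl.length := by
  cases tl with
  | nil => rfl
  | cons f t => cases f <;> rfl

def denT : List BFrame → List Char → Bool
  | [], m => loopTypesA m
  | .strct :: tl, m =>
    (match structA? m with
     | none => false
     | some r =>
       match r with
       | [] => false
       | y :: r2 => if y = ')' then denT (closeSlotB tl) r2 else false)
  | .key :: tl, m =>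
    (match m with
     | [] => false
     | c :: r => if c ∈ allowedBasicA ∧ c ≠ 'v' then denT (.val :: tl) r else false)
  | .val :: tl, m =>
    (match parseA? m with
     | none => false
     | some r => denT (.clos :: tl) r)
  | .clos :: tl, m =>
    (match m with
     | [] => false
     | y :: r2 => if y = '}' then denT (closeSlotB tl) r2 else false)
  termination_by stack _ => (stack.length, match stack with | f :: _ => frameRank f | [] => 0)
  decreasing_by all_goals (simp_wf; simp [closeSlotB_length, frameRank]; first | omega | (apply Prod.Lex.left; omega) | (apply Prod.Lex.right; omega))

def DispB : List BFrame → Prop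
  | .key :: _ => False
  | .clos :: _ => False
  | _ => True

theorem denT_nil (m : List Char) : denT [] m = loopTypesA m := by rw [denT]

theorem denT_strct (tl : List BFrame) (m : List Char) :
    denT (.strct :: tl) m =
      (match structA? m with
       | none => false
       | some r =>
         match r with
         | [] => false
         | y :: r2 => if y = ')' then denT (closeSlotB tl) r2 else false) := by
  rw [denT]

theorem denT_key (tl : List BFrame) (m : List Char) :
    denT (.key :: tl) m =
      (match m with
       | [] => false
       | c :: r => if c ∈ allowedBasicA ∧ c ≠ 'v' then denT (.val :: tl) r else false) := by
  conv_lhs => unfold denT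

theorem denT_clos (tl : List BFrame) (m : List Char) :
    denT (.clos :: tl) m =
      (match m with
       | [] => false
       | y :: r2 => if y = '}' then denT (closeSlotB tl) r2 else false) := by
  conv_lhs => unfold denT

theorem denT_val (tl : List BFrame) (m : List Char) :
    denT (.val :: tl) m =
      (match parseA? m with
       | none => false
       | some r => denT (.clos :: tl) r) := by
  conv_lhs => unfold denT

theorem parseAq_nil : parseA? [] = none := by simp [parseA?, parseTypeA]

theorem loopTypesA_nil : loopTypesA [] = true := by rw [loopTypesA]

theorem DispB_not_kc (stack : List BFrame) (hd : DispB stack) :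
    ¬ (stack.head? = some .key ∨ stack.head? = some .clos) := by
  cases stack with
  | nil => simp
  | cons f tl => cases f <;> simp_all [DispB]

theorem repCons_ne_nil (arr : Nat) (c : Char) (rest : List Char) :
    List.replicate arr 'a' ++ c :: rest ≠ [] := by
  cases arr <;> simp [List.replicate_succ]

theorem repCons_head_ne (arr : Nat) (c : Char) (rest : List Char)
    (h : arr ≠ 0 ∨ c ≠ ')') :
    (List.replicate arr 'a' ++ c :: rest).head? ≠ some ')' := by
  cases arr with
  | zero =>
    rcases h with h | h
    · exact absurd rfl h
    · simpa using h
  | succ n => rw [List.replicate_succ]; simp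

theorem denT_step (stack : List BFrame) (m r : List Char)
    (hd : DispB stack) (hp : parseA? m = some r) :
    denT stack m = denT (closeSlotB stack) r := by
  cases stack with
  | nil =>
    cases m with
    | nil => rw [parseAq_nil] at hp; cases hp
    | cons c ms =>
      rw [denT_nil, loopTypesA_cons, hp]
      show loopTypesA r = denT (closeSlotB []) r
      rw [show closeSlotB [] = [] from rfl, denT_nil]
  | cons f tl =>
    cases f with
    | strct =>
      cases m with
      | nil => rw [parseAq_nil] at hp; cases hp
      | cons c ms =>
        have hc : c ≠ ')' := by
          rintro rfl
          rw [parseAq_other0 _ _ (by decide) (by decide) (by decide)] at hp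
          cases hp
        rw [denT_strct, structAq_cons c ms hc, hp]
        rw [show closeSlotB (BFrame.strct :: tl) = BFrame.strct :: tl from rfl, denT_strct]
    | key => exact hd.elim
    | val =>
      rw [denT_val, hp]
      rfl
    | clos => exact hd.elim

theorem denT_fail (stack : List BFrame) (m : List Char)
    (hd : DispB stack) (hm : m ≠ []) (hh : m.head? ≠ some ')') (hp : parseA? m = none) :
    denT stack m = false := by
  cases stack with
  | nil =>
    cases m with
    | nil => exact absurd rfl hm
    | cons c ms => rw [denT_nil, loopTypesA_cons, hp]
  | cons f tl =>
    cases f with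
    | strct =>
      cases m with
      | nil => exact absurd rfl hm
      | cons c ms =>
        have hc : c ≠ ')' := by rintro rfl; exact hh (by simp)
        rw [denT_strct, structAq_cons c ms hc, hp]
    | key => exact hd.elim
    | val => rw [denT_val, hp]
    | clos => exact hd.elim

theorem denT_keycomp (stack : List BFrame) (rest : List Char) :
    denT (.key :: stack) rest =
      (match dictStep rest with
       | none => false
       | some r2 => denT (closeSlotB stack) r2) := by
  rw [denT_key]
  cases rest with
  | nil => simp [dictStep]
  | cons k r3 =>
    rw [dictStep]
    by_cases hk : k ∈ allowedBasicA ∧ k ≠ 'v'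
    · simp only [if_pos hk]
      rw [denT_val]
      cases hp : parseA? r3 with
      | none => simp
      | some r =>
        simp only
        rw [denT_clos]
        cases r with
        | nil => simp [matchClose]
        | cons y r2 =>
          by_cases hy : y = '}'
          · subst hy; simp [matchClose]
          · simp [matchClose, hy]
    · simp [if_neg hk]

theorem scanB_dispatch (c : Char) (rest : List Char) (stack : List BFrame) (arr : Nat)
    (hd : DispB stack) :
    scanB (c :: rest) stack arr =
      (if c ∈ basicB then scanB rest (closeSlotB stack) 0
       else if c = 'a' then scanB rest stack (arr + 1)
       else if c = '{' then (if arr == 0 then false else scanB rest (.key :: stack) 0)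
       else if c = '(' then scanB rest (.strct :: stack) 0
       else if c = ')' then
         (if arr == 0 then
           match stack with
           | .strct :: tl => scanB rest (closeSlotB tl) 0
           | _ => false
         else false)
       else false) := by
  cases stack with
  | nil => rfl
  | cons f tl => cases f with
    | strct => rfl
    | val => rfl
    | key => exact hd.elim
    | clos => exact hd.elim

theorem main_dispatch (c : Char) (rest : List Char) (stack : List BFrame) (arr : Nat)
    (hd : DispB stack)
    (ih : ∀ (stack' : List BFrame) (arr' : Nat),
      ((stack'.head? = some .key ∨ stack'.head? = some .clos) → arr' = 0) →
      scanB rest stack' arr' = denT stack' (List.replicate arr' 'a' ++ rest)) :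
    scanB (c :: rest) stack arr = denT stack (List.replicate arr 'a' ++ c :: rest) := by
  rw [scanB_dispatch c rest stack arr hd, basicB_eq]
  by_cases hc : c ∈ allowedBasicA
  · rw [if_pos hc, ih (closeSlotB stack) 0 (by simp)]
    simp only [List.replicate_zero, List.nil_append]
    exact (denT_step stack _ rest hd (parseAq_rep_basic arr c rest hc)).symm
  · rw [if_neg hc]
    by_cases ha : c = 'a'
    · subst ha
      rw [if_pos rfl, ih stack (arr + 1) (fun h => absurd h (DispB_not_kc stack hd))]
      have : List.replicate (arr + 1) 'a' ++ rest = List.replicate arr 'a' ++ 'a' :: rest := by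
        rw [List.replicate_succ']; simp
      rw [this]
    · rw [if_neg ha]
      by_cases hb : c = '{'
      · subst hb
        rw [if_pos rfl]
        cases arr with
        | zero =>
          rw [if_pos (show ((0:Nat) == 0) = true from by decide)]
          exact (denT_fail stack _ hd (by simp) (by simp)
            (parseAq_other0 _ _ (by decide) (by decide) (by decide))).symm
        | succ n =>
          have h0 : ((n + 1 : Nat) == 0) = false := by simp
          rw [h0]
          simp only [Bool.false_eq_true, if_false]
          rw [ih (.key :: stack) 0 (fun _ => rfl)]
          simp only [List.replicate_zero, List.nil_append]
          rw [denT_keycomp stack rest]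
          cases hds : dictStep rest with
          | none =>
            have hp := (parseAq_rep_brace n rest).trans hds
            rw [denT_fail stack _ hd (repCons_ne_nil _ _ _)
              (repCons_head_ne _ _ _ (Or.inl (by omega))) hp]
          | some r2 =>
            have hp := (parseAq_rep_brace n rest).trans hds
            rw [denT_step stack _ r2 hd hp]
      · rw [if_neg hb]
        by_cases hpn : c = '('
        · subst hpn
          rw [if_pos rfl, ih (.strct :: stack) 0 (fun _ => rfl)]
          simp only [List.replicate_zero, List.nil_append]
          rw [denT_strct]
          have hp := parseAq_rep_paren arr rest
          cases hs : structA? rest with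
          | none =>
            rw [hs] at hp
            simp only at hp
            rw [denT_fail stack _ hd (repCons_ne_nil _ _ _)
              (repCons_head_ne _ _ _ (Or.inr (by decide))) hp]
          | some r =>
            rw [hs] at hp
            simp only at hp
            cases r with
            | nil =>
              simp only [matchClose] at hp
              rw [denT_fail stack _ hd (repCons_ne_nil _ _ _)
                (repCons_head_ne _ _ _ (Or.inr (by decide))) hp]
            | cons y r2 =>
              by_cases hy : y = ')'
              · subst hy
                simp only [matchClose] at hp
                rw [denT_step stack _ r2 hd hp]
                simp
              · simp only [matchClose, if_neg hy] at hp
                rw [denT_fail stack _ hd (repCons_ne_nil _ _ _)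
                  (repCons_head_ne _ _ _ (Or.inr (by decide))) hp]
                simp [hy]
        · rw [if_neg hpn]
          by_cases hrp : c = ')'
          · subst hrp
            rw [if_pos rfl]
            cases arr with
            | zero =>
              rw [if_pos (show ((0:Nat) == 0) = true from by decide)]
              cases stack with
              | nil =>
                show false = _
                simp only [List.replicate_zero, List.nil_append]
                rw [denT_nil, loopTypesA_cons,
                  parseAq_other0 _ _ (by decide) (by decide) (by decide)]
              | cons f tl =>
                cases f with
                | strct =>
                  show scanB rest (closeSlotB tl) 0 = _
                  rw [ih (closeSlotB tl) 0 (by simp)]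
                  simp only [List.replicate_zero, List.nil_append]
                  rw [denT_strct, structAq_rparen]
                  simp
                | val =>
                  show false = _
                  simp only [List.replicate_zero, List.nil_append]
                  rw [denT_val, parseAq_other0 _ _ (by decide) (by decide) (by decide)]
                | key => exact hd.elim
                | clos => exact hd.elim
            | succ n =>
              have h0 : ((n + 1 : Nat) == 0) = false := by simp
              rw [h0]
              simp only [Bool.false_eq_true, if_false]
              exact (denT_fail stack _ hd (repCons_ne_nil _ _ _)
                (repCons_head_ne _ _ _ (Or.inl (by omega)))
                (parseAq_rep_other _ _ _ (by decide) (by decide) (by decide) (by decide))).symm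
          · rw [if_neg hrp]
            exact (denT_fail stack _ hd (repCons_ne_nil _ _ _)
              (repCons_head_ne _ _ _ (Or.inr hrp))
              (parseAq_rep_other _ _ _ hc ha hpn hb)).symm

theorem scanB_denT : ∀ (l : List Char) (stack : List BFrame) (arr : Nat),
    ((stack.head? = some .key ∨ stack.head? = some .clos) → arr = 0) →
    scanB l stack arr = denT stack (List.replicate arr 'a' ++ l) := by
  intro l
  induction l with
  | nil =>
    intro stack arr hinv
    rw [List.append_nil]
    cases stack with
    | nil =>
      cases arr with
      | zero => simp [scanB, denT_nil, loopTypesA_nil]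
      | succ n =>
        rw [List.replicate_succ, denT_nil, loopTypesA_cons]
        rw [← List.replicate_succ, parseAq_rep_nil]
        simp [scanB]
    | cons f tl =>
      cases f with
      | strct =>
        cases arr with
        | zero =>
          rw [denT_strct]
          simp only [List.replicate_zero]
          rw [structAq_nil]
          simp [scanB]
        | succ n =>
          rw [List.replicate_succ, denT_strct, structAq_cons _ _ (by decide)]
          rw [← List.replicate_succ, parseAq_rep_nil]
          simp [scanB]
      | key =>
        have harr : arr = 0 := hinv (Or.inl rfl)
        subst harr
        rw [denT_key]; simp [scanB]
      | val =>
        rw [denT_val, parseAq_rep_nil]; simp [scanB]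
      | clos =>
        have harr : arr = 0 := hinv (Or.inr rfl)
        subst harr
        rw [denT_clos]; simp [scanB]
  | cons c rest ih =>
    intro stack arr hinv
    cases stack with
    | cons f tl =>
      cases f with
      | key =>
        have harr : arr = 0 := hinv (Or.inl rfl)
        subst harr
        show scanB (c :: rest) (.key :: tl) 0 = denT (.key :: tl) (List.replicate 0 'a' ++ c :: rest)
        simp only [List.replicate_zero, List.nil_append]
        rw [denT_key]
        show (if c ∈ basicB ∧ c ≠ 'v' then scanB rest (.val :: tl) 0 else false)
          = (if c ∈ allowedBasicA ∧ c ≠ 'v' then denT (.val :: tl) rest else false)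
        rw [basicB_eq]
        by_cases hc : c ∈ allowedBasicA ∧ c ≠ 'v'
        · rw [if_pos hc, if_pos hc, ih (.val :: tl) 0 (by simp)]
          simp
        · rw [if_neg hc, if_neg hc]
      | clos =>
        have harr : arr = 0 := hinv (Or.inr rfl)
        subst harr
        show scanB (c :: rest) (.clos :: tl) 0 = denT (.clos :: tl) (List.replicate 0 'a' ++ c :: rest)
        simp only [List.replicate_zero, List.nil_append]
        rw [denT_clos]
        show (if c = '}' then scanB rest (closeSlotB tl) 0 else false)
          = (if c = '}' then denT (closeSlotB tl) rest else false)
        by_cases hc : c = '}'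
        · rw [if_pos hc, if_pos hc, ih (closeSlotB tl) 0 (by simp)]
          simp
        · rw [if_neg hc, if_neg hc]
      | strct => exact main_dispatch c rest (.strct :: tl) arr trivial ih
      | val => exact main_dispatch c rest (.val :: tl) arr trivial ih
    | nil => exact main_dispatch c rest [] arr trivial ih

-- ===== VERDICT (by name: the statement is the Claim_ definition above) =====
theorem is_valid_dbus_signature_spec : Claim_equal_is_valid_dbus_signature := by
  intro sig _
  unfold Spec_is_valid_dbus_signature is_valid_dbus_signature is_valid_dbus_signature_alt
  have h := scanB_denT sig.toList [] 0 (by simp)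
  simp only [List.replicate_zero, List.nil_append, denT_nil] at h
  exact h.symm
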